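-- pv_equiv track=rewrite | github.com/Jmkiy/PE-EA | src/PE-EA.py | rfunc
-- ===== SOURCE A (Python) =====
-- def rfunc(triple_list):
--         head = {}
--         tail = {}
--         rel_count = {}
--         r_mat_ind = []
--         r_mat_val = []
--         cleaned_triple_list = [(int(h), int(r), int(t)) for h, r, t in triple_list]
--         for triple in cleaned_triple_list:
--             r_mat_ind.append([triple[0], triple[2]])
--             r_mat_val.append(triple[1])
--             if triple[1] not in rel_count:
--                 rel_count[triple[1]] = 1
--                 head[triple[1]] = set()
--                 tail[triple[1]] = set()
--                 head[triple[1]].add(triple[0])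
--                 tail[triple[1]].add(triple[2])
--             else:
--                 rel_count[triple[1]] += 1
--                 head[triple[1]].add(triple[0])
--                 tail[triple[1]].add(triple[2])
--
--         return head, tail
-- ===== SOURCE B (Python) =====
-- def rfunc(triple_list):
--     triples = [(int(h), int(r), int(t)) for h, r, t in triple_list]
--     rels = list(dict.fromkeys(r for _, r, _ in triples))
--     head = {r: {h for h, rr, _ in triples if rr == r} for r in rels}
--     tail = {r: {t for _, rr, t in triples if rr == r} for r in rels}
--     return head, tail
-- ===== Notes on version B (the rewrite author's own statement) =====
-- stated objective: alternative
-- what changed: Replaces A's single incremental pass (per-triple dict membership test with branch on new-vs-seen relation, plus unused rel_count/r_mat bookkeeping) by a two-phase decomposition: first collect the distinct relations in order of first occurrence, then build each relation's head/tail set in one shot by a filtering comprehension over the triples.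
import Mathlib
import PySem

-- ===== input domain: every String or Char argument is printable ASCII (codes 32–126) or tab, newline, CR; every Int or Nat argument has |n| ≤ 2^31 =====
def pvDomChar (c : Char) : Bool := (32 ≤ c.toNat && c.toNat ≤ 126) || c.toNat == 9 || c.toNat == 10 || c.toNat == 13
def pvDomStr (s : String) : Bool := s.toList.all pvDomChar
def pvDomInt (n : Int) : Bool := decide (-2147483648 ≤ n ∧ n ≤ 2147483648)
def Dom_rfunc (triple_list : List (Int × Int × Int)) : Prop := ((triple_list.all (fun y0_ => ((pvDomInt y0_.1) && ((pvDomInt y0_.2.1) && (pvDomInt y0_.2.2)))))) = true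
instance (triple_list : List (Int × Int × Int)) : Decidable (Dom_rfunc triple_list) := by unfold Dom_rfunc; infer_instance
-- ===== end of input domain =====

-- B replaces A's single incremental pass by a two-phase decomposition (distinct relations first,
-- then each head/tail set built in one shot by a filtering comprehension); alternative, not faster.


-- ===== PORT A =====
-- state: (head, tail, rel_count, r_mat_ind, r_mat_val)
def rfuncStep
    (st : PySem.Dict Int (PySem.Set Int) × PySem.Dict Int (PySem.Set Int) × PySem.Dict Int Int × List (List Int) × List Int)
    (triple : Int × Int × Int) :
    PySem.Dict Int (PySem.Set Int) × PySem.Dict Int (PySem.Set Int) × PySem.Dict Int Int × List (List Int) × List Int :=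
  let head := st.1
  let tail := st.2.1
  let rel_count := st.2.2.1
  let r_mat_ind := st.2.2.2.1 ++ [[triple.1, triple.2.2]]
  let r_mat_val := st.2.2.2.2 ++ [triple.2.1]
  if rel_count.contains triple.2.1 = false then
    -- rel_count[r] = 1; head[r] = set(); tail[r] = set(); head[r].add(h); tail[r].add(t)
    let rel_count := rel_count.insert triple.2.1 1
    let head := (head.insert triple.2.1 PySem.Set.empty).modify triple.2.1 PySem.Set.empty
      (fun s => PySem.Set.add s triple.1)
    let tail := (tail.insert triple.2.1 PySem.Set.empty).modify triple.2.1 PySem.Set.empty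
      (fun s => PySem.Set.add s triple.2.2)
    (head, tail, rel_count, r_mat_ind, r_mat_val)
  else
    -- rel_count[r] += 1; head[r].add(h); tail[r].add(t)
    let rel_count := rel_count.modify triple.2.1 0 (· + 1)
    let head := head.modify triple.2.1 PySem.Set.empty (fun s => PySem.Set.add s triple.1)
    let tail := tail.modify triple.2.1 PySem.Set.empty (fun s => PySem.Set.add s triple.2.2)
    (head, tail, rel_count, r_mat_ind, r_mat_val)

def rfunc (triple_list : List (Int × Int × Int)) : (List (Int × List Int)) × (List (Int × List Int)) :=
  -- int(h) etc. are the identity on Int arguments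
  let cleaned_triple_list := triple_list.map (fun p => (p.1, p.2.1, p.2.2))
  let st := cleaned_triple_list.foldl rfuncStep
    (PySem.Dict.empty, PySem.Dict.empty, PySem.Dict.empty, [], [])
  (st.1.items, st.2.1.items)

-- ===== PORT B =====
def rfunc_alt (triple_list : List (Int × Int × Int)) : (List (Int × List Int)) × (List (Int × List Int)) :=
  let triples := triple_list.map (fun p => (p.1, p.2.1, p.2.2))
  let rels := PySem.List.dedup (triples.map (fun p => p.2.1))
  let head := rels.map (fun r =>
    (r, PySem.Set.ofList ((triples.filter (fun p => p.2.1 == r)).map (fun p => p.1))))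
  let tail := rels.map (fun r =>
    (r, PySem.Set.ofList ((triples.filter (fun p => p.2.1 == r)).map (fun p => p.2.2))))
  (head, tail)

-- ===== PRECONDITION & SPEC =====
def Spec_rfunc (triple_list : List (Int × Int × Int)) (out : (List (Int × List Int)) × (List (Int × List Int))) : Prop := out = rfunc_alt triple_list
instance (triple_list : List (Int × Int × Int)) (out : (List (Int × List Int)) × (List (Int × List Int))) : Decidable (Spec_rfunc triple_list out) := by unfold Spec_rfunc; infer_instance

-- ===== CLAIM (what is proved, stated in full; the proofs are below) =====
def Claim_equal_rfunc : Prop := ∀ (triple_list : List (Int × Int × Int)), Dom_rfunc triple_list → Spec_rfunc triple_list (rfunc triple_list)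

-- ===== LEMMAS AND PROOFS =====

-- the identity map in both ports really is the identity
lemma map_eta (l : List (Int × Int × Int)) : l.map (fun p => (p.1, p.2.1, p.2.2)) = l := by
  conv_rhs => rw [← List.map_id l]
  exact List.map_congr_left (fun a _ => rfl)

-- a dict with nodup keys is its keys paired with their getD values
lemma items_eq_keys_map {κ ν : Type} [BEq κ] [LawfulBEq κ] (d : PySem.Dict κ ν) (d0 : ν)
    (h : d.keys.Nodup) : d.items = d.keys.map (fun k => (k, d.getD k d0)) := by
  have hk : d.keys = d.items.map (fun p => p.1) := by simp only [PySem.Dict.keys]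
  rw [hk, List.map_map]
  conv_lhs => rw [← List.map_id d.items]
  refine List.map_congr_left (fun p hp => ?_)
  have hmem : (p.1, p.2) ∈ d.items := by simpa using hp
  simp [PySem.Dict.getD_of_mem_items d hmem h d0]

-- invariant for A's fold: keys track the distinct relations seen, and each key's set is the
-- ordered dedup of that relation's heads/tails
lemma rfunc_fold_spec (l : List (Int × Int × Int))
    (hd tl : PySem.Dict Int (PySem.Set Int)) (rc : PySem.Dict Int Int)
    (mi : List (List Int)) (mv : List Int)
    (hH : ∀ r, hd.contains r = rc.contains r)
    (hT : ∀ r, tl.contains r = rc.contains r) :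
    (l.foldl rfuncStep (hd, tl, rc, mi, mv)).1.keys = PySem.Set.update hd.keys (l.map (fun p => p.2.1))
    ∧ (l.foldl rfuncStep (hd, tl, rc, mi, mv)).2.1.keys = PySem.Set.update tl.keys (l.map (fun p => p.2.1))
    ∧ (∀ c, (l.foldl rfuncStep (hd, tl, rc, mi, mv)).1.getD c PySem.Set.empty
        = PySem.Set.update (hd.getD c PySem.Set.empty) ((l.filter (fun p => p.2.1 == c)).map (fun p => p.1)))
    ∧ (∀ c, (l.foldl rfuncStep (hd, tl, rc, mi, mv)).2.1.getD c PySem.Set.empty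
        = PySem.Set.update (tl.getD c PySem.Set.empty) ((l.filter (fun p => p.2.1 == c)).map (fun p => p.2.2))) := by
  induction l generalizing hd tl rc mi mv with
  | nil => exact ⟨rfl, rfl, fun _ => rfl, fun _ => rfl⟩
  | cons x xs ih =>
    obtain ⟨h₁, r₁, t₁⟩ := x
    by_cases hrc : rc.contains r₁ = false
    · -- fresh relation
      have hhd : hd.contains r₁ = false := by rw [hH]; exact hrc
      have htl : tl.contains r₁ = false := by rw [hT]; exact hrc
      have hstep : rfuncStep (hd, tl, rc, mi, mv) (h₁, r₁, t₁) =
          ((hd.insert r₁ PySem.Set.empty).modify r₁ PySem.Set.empty (fun s => PySem.Set.add s h₁),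
           (tl.insert r₁ PySem.Set.empty).modify r₁ PySem.Set.empty (fun s => PySem.Set.add s t₁),
           rc.insert r₁ 1, mi ++ [[h₁, t₁]], mv ++ [r₁]) := by
        simp [rfuncStep, hrc]
      have hH' : ∀ r, ((hd.insert r₁ PySem.Set.empty).modify r₁ PySem.Set.empty
          (fun s => PySem.Set.add s h₁)).contains r = (rc.insert r₁ 1).contains r := by
        intro r
        simp [PySem.Dict.contains_modify, PySem.Dict.contains_insert, hH r]
      have hT' : ∀ r, ((tl.insert r₁ PySem.Set.empty).modify r₁ PySem.Set.empty
          (fun s => PySem.Set.add s t₁)).contains r = (rc.insert r₁ 1).contains r := by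
        intro r
        simp [PySem.Dict.contains_modify, PySem.Dict.contains_insert, hT r]
      obtain ⟨k1, k2, g1, g2⟩ := ih _ _ _ (mi ++ [[h₁, t₁]]) (mv ++ [r₁]) hH' hT'
      have hcH : (hd.insert r₁ PySem.Set.empty).contains r₁ = true := by
        simp
      have keysH : ((hd.insert r₁ PySem.Set.empty).modify r₁ PySem.Set.empty
          (fun s => PySem.Set.add s h₁)).keys = hd.keys ++ [r₁] := by
        rw [PySem.Dict.keys_modify, PySem.Dict.keys_insert_of_contains _ _ hcH,
          PySem.Dict.keys_insert_of_not_contains _ _ hhd]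
      have hcT : (tl.insert r₁ PySem.Set.empty).contains r₁ = true := by
        simp
      have keysT : ((tl.insert r₁ PySem.Set.empty).modify r₁ PySem.Set.empty
          (fun s => PySem.Set.add s t₁)).keys = tl.keys ++ [r₁] := by
        rw [PySem.Dict.keys_modify, PySem.Dict.keys_insert_of_contains _ _ hcT,
          PySem.Dict.keys_insert_of_not_contains _ _ htl]
      have hmemH : r₁ ∉ hd.keys := by
        intro hmem
        rw [← PySem.Dict.contains_iff_mem_keys] at hmem
        simp [hhd] at hmem
      have hmemT : r₁ ∉ tl.keys := by
        intro hmem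
        rw [← PySem.Dict.contains_iff_mem_keys] at hmem
        simp [htl] at hmem
      refine ⟨?_, ?_, ?_, ?_⟩
      · simp only [List.foldl_cons, hstep, List.map_cons]
        rw [k1, keysH]
        simp [PySem.Set.update, PySem.Set.add_of_not_mem hmemH]
      · simp only [List.foldl_cons, hstep, List.map_cons]
        rw [k2, keysT]
        simp [PySem.Set.update, PySem.Set.add_of_not_mem hmemT]
      · intro c
        simp only [List.foldl_cons, hstep, List.filter_cons]
        rw [g1]
        have hgd : ((hd.insert r₁ PySem.Set.empty).modify r₁ PySem.Set.empty
            (fun s => PySem.Set.add s h₁)).getD c PySem.Set.empty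
            = if c = r₁ then PySem.Set.add (hd.getD c PySem.Set.empty) h₁
              else hd.getD c PySem.Set.empty := by
          rw [PySem.Dict.getD_modify]
          by_cases hc : c = r₁
          · subst hc
            simp [PySem.Dict.getD_of_not_contains hd _ hhd]
          · simp [hc, PySem.Dict.getD_insert]
        rw [hgd]
        by_cases hc : r₁ = c
        · subst hc; simp [PySem.Set.update]
        · simp [hc, Ne.symm hc]
      · intro c
        simp only [List.foldl_cons, hstep, List.filter_cons]
        rw [g2]
        have hgd : ((tl.insert r₁ PySem.Set.empty).modify r₁ PySem.Set.empty
            (fun s => PySem.Set.add s t₁)).getD c PySem.Set.empty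
            = if c = r₁ then PySem.Set.add (tl.getD c PySem.Set.empty) t₁
              else tl.getD c PySem.Set.empty := by
          rw [PySem.Dict.getD_modify]
          by_cases hc : c = r₁
          · subst hc
            simp [PySem.Dict.getD_of_not_contains tl _ htl]
          · simp [hc, PySem.Dict.getD_insert]
        rw [hgd]
        by_cases hc : r₁ = c
        · subst hc; simp [PySem.Set.update]
        · simp [hc, Ne.symm hc]
    · -- already-seen relation
      have hrc' : rc.contains r₁ = true := by
        cases h : rc.contains r₁
        · exact absurd h hrc
        · rfl
      have hhd : hd.contains r₁ = true := by rw [hH]; exact hrc'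
      have htl : tl.contains r₁ = true := by rw [hT]; exact hrc'
      have hstep : rfuncStep (hd, tl, rc, mi, mv) (h₁, r₁, t₁) =
          (hd.modify r₁ PySem.Set.empty (fun s => PySem.Set.add s h₁),
           tl.modify r₁ PySem.Set.empty (fun s => PySem.Set.add s t₁),
           rc.modify r₁ 0 (· + 1), mi ++ [[h₁, t₁]], mv ++ [r₁]) := by
        simp [rfuncStep, hrc']
      have hH' : ∀ r, (hd.modify r₁ PySem.Set.empty (fun s => PySem.Set.add s h₁)).contains r
          = (rc.modify r₁ 0 (· + 1)).contains r := by
        intro r; simp [PySem.Dict.contains_modify, hH r]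
      have hT' : ∀ r, (tl.modify r₁ PySem.Set.empty (fun s => PySem.Set.add s t₁)).contains r
          = (rc.modify r₁ 0 (· + 1)).contains r := by
        intro r; simp [PySem.Dict.contains_modify, hT r]
      obtain ⟨k1, k2, g1, g2⟩ := ih _ _ _ (mi ++ [[h₁, t₁]]) (mv ++ [r₁]) hH' hT'
      have hmemH : r₁ ∈ hd.keys := (PySem.Dict.contains_iff_mem_keys hd r₁).mp hhd
      have hmemT : r₁ ∈ tl.keys := (PySem.Dict.contains_iff_mem_keys tl r₁).mp htl
      have keysH : (hd.modify r₁ PySem.Set.empty (fun s => PySem.Set.add s h₁)).keys = hd.keys := by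
        rw [PySem.Dict.keys_modify, PySem.Dict.keys_insert_of_contains _ _ hhd]
      have keysT : (tl.modify r₁ PySem.Set.empty (fun s => PySem.Set.add s t₁)).keys = tl.keys := by
        rw [PySem.Dict.keys_modify, PySem.Dict.keys_insert_of_contains _ _ htl]
      refine ⟨?_, ?_, ?_, ?_⟩
      · simp only [List.foldl_cons, hstep, List.map_cons]
        rw [k1, keysH]
        simp [PySem.Set.update, PySem.Set.add_of_mem hmemH]
      · simp only [List.foldl_cons, hstep, List.map_cons]
        rw [k2, keysT]
        simp [PySem.Set.update, PySem.Set.add_of_mem hmemT]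
      · intro c
        simp only [List.foldl_cons, hstep, List.filter_cons]
        rw [g1, PySem.Dict.getD_modify]
        by_cases hc : r₁ = c
        · subst hc; simp [PySem.Set.update]
        · simp [hc, Ne.symm hc]
      · intro c
        simp only [List.foldl_cons, hstep, List.filter_cons]
        rw [g2, PySem.Dict.getD_modify]
        by_cases hc : r₁ = c
        · subst hc; simp [PySem.Set.update]
        · simp [hc, Ne.symm hc]

-- ===== VERDICT (by name: the statement is the Claim_ definition above) =====
theorem rfunc_spec : Claim_equal_rfunc := by
  intro triple_list _
  unfold Spec_rfunc rfunc rfunc_alt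
  rw [map_eta]
  dsimp only
  obtain ⟨k1, k2, g1, g2⟩ := rfunc_fold_spec triple_list
    PySem.Dict.empty PySem.Dict.empty PySem.Dict.empty [] []
    (fun r => by simp [PySem.Dict.contains_empty]) (fun r => by simp [PySem.Dict.contains_empty])
  have hupd : ∀ (xs : List Int), PySem.Set.update ([] : PySem.Set Int) xs = PySem.Set.ofList xs :=
    fun xs => rfl
  have hkeys1 : (triple_list.foldl rfuncStep
      (PySem.Dict.empty, PySem.Dict.empty, PySem.Dict.empty, [], [])).1.keys
      = PySem.Set.ofList (triple_list.map (fun p => p.2.1)) := by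
    rw [k1]; simp [PySem.Dict.keys_empty, hupd]
  have hkeys2 : (triple_list.foldl rfuncStep
      (PySem.Dict.empty, PySem.Dict.empty, PySem.Dict.empty, [], [])).2.1.keys
      = PySem.Set.ofList (triple_list.map (fun p => p.2.1)) := by
    rw [k2]; simp [PySem.Dict.keys_empty, hupd]
  refine Prod.ext ?_ ?_
  · dsimp only
    rw [items_eq_keys_map _ PySem.Set.empty (by rw [hkeys1]; exact PySem.Set.nodup_ofList _)]
    rw [hkeys1]
    simp only [PySem.List.dedup_eq_ofList]
    refine List.map_congr_left (fun r _ => ?_)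
    rw [g1 r]
    simp [PySem.Dict.getD_empty, hupd]
  · dsimp only
    rw [items_eq_keys_map _ PySem.Set.empty (by rw [hkeys2]; exact PySem.Set.nodup_ofList _)]
    rw [hkeys2]
    simp only [PySem.List.dedup_eq_ofList]
    refine List.map_congr_left (fun r _ => ?_)
    rw [g2 r]
    simp [PySem.Dict.getD_empty, hupd]
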